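-- pv_equiv track=rewrite | github.com/OscarTsao/bitoguard-hackathon | bitoguard_core/transductive_v1/common.py | _unique_feature_names
-- ===== SOURCE A (Python) =====
-- def _unique_feature_names(columns: list[str]) -> list[str]:
--     seen: dict[str, int] = {}
--     unique: list[str] = []
--     for column in columns:
--         count = seen.get(column, 0)
--         unique.append(column if count == 0 else f"{column}_{count}")
--         seen[column] = count + 1
--     return unique
-- ===== SOURCE B (Python) =====
-- def _unique_feature_names(columns: list[str]) -> list[str]:
--     # Two-phase group-by: first map each name to the list of indices where it
--     # occurs, then fill a preallocated result list group by group, suffixing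
--     # each occurrence with its rank within the group (bare name for rank 0).
--     positions: dict[str, list[int]] = {}
--     for i, name in enumerate(columns):
--         positions.setdefault(name, []).append(i)
--     result: list[str] = [""] * len(columns)
--     for name, idxs in positions.items():
--         for k, i in enumerate(idxs):
--             result[i] = name if k == 0 else f"{name}_{k}"
--     return result
-- ===== Notes on version B (the rewrite author's own statement) =====
-- stated objective: alternative
-- what changed: Replaces A's single stateful running-counter pass with a two-phase group-by: first build a dict mapping each name to the list of indices where it occurs, then fill a preallocated result list group by group, suffixing each occurrence with its rank within its group.
import Mathlib
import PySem

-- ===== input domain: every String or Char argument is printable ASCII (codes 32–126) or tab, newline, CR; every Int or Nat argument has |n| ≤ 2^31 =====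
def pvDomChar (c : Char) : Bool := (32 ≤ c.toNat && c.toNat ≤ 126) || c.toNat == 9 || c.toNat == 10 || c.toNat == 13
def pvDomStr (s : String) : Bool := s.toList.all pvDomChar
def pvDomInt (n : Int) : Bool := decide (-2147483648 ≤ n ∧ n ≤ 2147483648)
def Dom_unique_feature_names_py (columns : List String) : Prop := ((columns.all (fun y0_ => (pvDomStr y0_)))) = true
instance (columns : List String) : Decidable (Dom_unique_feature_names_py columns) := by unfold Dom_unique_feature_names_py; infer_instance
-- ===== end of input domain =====

-- B replaces A's single running-counter pass by a two-phase group-by (name → list of indices,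
-- then a grouped fill of a preallocated result list); objective: alternative, same cost.

-- ===== PORT A =====
def unique_feature_names_py (columns : List String) : List String :=
  (columns.foldl
    (fun (st : PySem.Dict String Int × List String) column =>
      let count := st.1.getD column 0
      (st.1.insert column (count + 1),
       st.2 ++ [if count = 0 then column else column ++ "_" ++ PySem.Int.toStr count]))
    ((PySem.Dict.empty : PySem.Dict String Int), ([] : List String))).2

-- ===== PORT B =====
-- result[i] = v : exact for in-range indices (Python raises IndexError out of range; the
-- indices written here come from enumerate and are always in range)
def pyListSet {α : Type} (xs : List α) (i : Int) (v : α) : List α :=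
  let j := if i < 0 then i + xs.length else i
  if 0 ≤ j ∧ j < xs.length then xs.set j.toNat v else xs

def unique_feature_names_py_alt (columns : List String) : List String :=
  let positions : PySem.Dict String (List Int) :=
    (PySem.List.enumerate columns 0).foldl
      (fun d p => d.modify p.2 [] (· ++ [p.1])) PySem.Dict.empty
  positions.items.foldl
    (fun res q =>
      (PySem.List.enumerate q.2 0).foldl
        (fun r p => pyListSet r p.2 (if p.1 = 0 then q.1 else q.1 ++ "_" ++ PySem.Int.toStr p.1))
        res)
    (List.replicate columns.length "")

-- ===== PRECONDITION & SPEC =====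
def Spec_unique_feature_names_py (columns : List String) (out : List String) : Prop := out = unique_feature_names_py_alt columns
instance (columns : List String) (out : List String) : Decidable (Spec_unique_feature_names_py columns out) := by unfold Spec_unique_feature_names_py; infer_instance

-- ===== CLAIM (what is proved, stated in full; the proofs are below) =====
def Claim_equal_unique_feature_names_py : Prop := ∀ (columns : List String), Dom_unique_feature_names_py columns → Spec_unique_feature_names_py columns (unique_feature_names_py columns)

-- ===== LEMMAS AND PROOFS =====

-- the renamed form of one occurrence: bare name for rank 0, name_k thereafter
def pvRen (c : String) (k : Int) : String :=
  if k = 0 then c else c ++ "_" ++ PySem.Int.toStr k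

-- A's pass, abstracted over the counting function carried by the dict
def pvSpecFun : List String → (String → Int) → List String
  | [], _ => []
  | c :: rest, f =>
      pvRen c (f c) :: pvSpecFun rest (fun x => if x = c then f c + 1 else f x)

theorem pvSpecFun_congr (l : List String) (f g : String → Int) (h : ∀ x, f x = g x) :
    pvSpecFun l f = pvSpecFun l g := by
  induction l generalizing f g with
  | nil => rfl
  | cons c rest ih =>
      simp only [pvSpecFun, h c]
      refine congrArg _ (ih _ _ (fun x => ?_))
      by_cases hx : x = c <;> simp [hx, h x]

theorem pvFoldA (rest : List String) (d : PySem.Dict String Int) (acc : List String) :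
    (rest.foldl
      (fun (st : PySem.Dict String Int × List String) column =>
        let count := st.1.getD column 0
        (st.1.insert column (count + 1),
         st.2 ++ [if count = 0 then column else column ++ "_" ++ PySem.Int.toStr count]))
      (d, acc)).2 = acc ++ pvSpecFun rest (fun c => d.getD c 0) := by
  induction rest generalizing d acc with
  | nil => simp [pvSpecFun]
  | cons c rest ih =>
      simp only [List.foldl_cons, ih, pvSpecFun, pvRen, List.append_assoc, List.singleton_append]
      refine congrArg _ (congrArg _ (pvSpecFun_congr _ _ _ (fun x => ?_)))
      rw [PySem.Dict.getD_insert]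

-- common "gold" form: element j becomes pvRen columns[j] (count of columns[j] in the prefix)
def pvGold (pre : List String) : List String → List String
  | [] => []
  | c :: rest => pvRen c ((pre.count c : Nat) : Int) :: pvGold (pre ++ [c]) rest

theorem pvGold_eq_specFun (l : List String) (pre : List String) :
    pvGold pre l = pvSpecFun l (fun c => ((pre.count c : Nat) : Int)) := by
  induction l generalizing pre with
  | nil => rfl
  | cons c rest ih =>
      simp only [pvGold, pvSpecFun]
      refine congrArg _ ((ih (pre ++ [c])).trans (pvSpecFun_congr _ _ _ (fun x => ?_)))
      by_cases hx : x = c <;> simp [hx, List.count_append, Ne.symm]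

theorem pvGold_length (l : List String) (pre : List String) :
    (pvGold pre l).length = l.length := by
  induction l generalizing pre with
  | nil => rfl
  | cons c rest ih => simp [pvGold, ih]

theorem pvGold_getElem? (l : List String) (pre : List String) (j : Nat) (c : String)
    (hc : l[j]? = some c) :
    (pvGold pre l)[j]? = some (pvRen c (((pre ++ l.take j).count c : Nat) : Int)) := by
  induction l generalizing pre j with
  | nil => simp at hc
  | cons x rest ih =>
      cases j with
      | zero =>
          simp only [List.getElem?_cons_zero, Option.some_inj] at hc
          subst hc; simp [pvGold]
      | succ j =>
          simp only [List.getElem?_cons_succ] at hc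
          simp only [pvGold, List.getElem?_cons_succ, List.take_succ_cons]
          rw [ih (pre ++ [x]) j hc]
          simp

-- B side: the per-name index list, as a recursion over the columns
def pvIdxs (c : String) (s : Int) : List String → List Int
  | [] => []
  | x :: rest => if x = c then s :: pvIdxs c (s + 1) rest else pvIdxs c (s + 1) rest

theorem pvIdxs_eq_enumFilter (cols : List String) (s : Int) (c : String) :
    ((PySem.List.enumerate cols s).filter (fun p => p.2 == c)).map (·.1) = pvIdxs c s cols := by
  induction cols generalizing s with
  | nil => simp [PySem.List.enumerate_nil, pvIdxs]
  | cons x rest ih =>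
      rw [PySem.List.enumerate_cons]
      by_cases hx : x = c <;> simp [pvIdxs, hx, ih]

theorem pvIdxs_ge (cols : List String) (c : String) (s : Int) :
    ∀ x ∈ pvIdxs c s cols, s ≤ x := by
  induction cols generalizing s with
  | nil => simp [pvIdxs]
  | cons y rest ih =>
      intro x hx
      simp only [pvIdxs] at hx
      by_cases hy : y = c
      · simp only [if_pos hy, List.mem_cons] at hx
        rcases hx with h | h
        · omega
        · have := ih (s + 1) x h; omega
      · have := ih (s + 1) x (by simpa [if_neg hy] using hx); omega

theorem pvIdxs_nodup (cols : List String) (c : String) (s : Int) :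
    (pvIdxs c s cols).Nodup := by
  induction cols generalizing s with
  | nil => simp [pvIdxs]
  | cons y rest ih =>
      simp only [pvIdxs]
      by_cases hy : y = c
      · simp only [if_pos hy, List.nodup_cons]
        exact ⟨fun hmem => by have := pvIdxs_ge rest c (s + 1) s hmem; omega, ih (s + 1)⟩
      · simpa [if_neg hy] using ih (s + 1)

theorem pvIdxs_mem_of (cols : List String) (c : String) (s : Int) (j : Nat)
    (hc : cols[j]? = some c) : s + (j : Int) ∈ pvIdxs c s cols := by
  induction cols generalizing s j with
  | nil => simp at hc
  | cons x rest ih =>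
      cases j with
      | zero =>
          simp only [List.getElem?_cons_zero, Option.some_inj] at hc
          subst hc
          simp [pvIdxs]
      | succ j =>
          simp only [List.getElem?_cons_succ] at hc
          have h := ih (s + 1) j hc
          have harith : s + ((j + 1 : Nat) : Int) = (s + 1) + (j : Int) := by push_cast; ring
          rw [harith]
          by_cases hx : x = c <;> simp [pvIdxs, hx, h]

theorem pvIdxs_mem_elim (cols : List String) (c : String) (s : Int) (x : Int)
    (hx : x ∈ pvIdxs c s cols) : ∃ j : Nat, x = s + (j : Int) ∧ cols[j]? = some c := by
  induction cols generalizing s with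
  | nil => simp [pvIdxs] at hx
  | cons y rest ih =>
      simp only [pvIdxs] at hx
      by_cases hy : y = c
      · simp only [if_pos hy, List.mem_cons] at hx
        rcases hx with h | h
        · exact ⟨0, by omega, by simp [hy]⟩
        · obtain ⟨j, hj1, hj2⟩ := ih (s + 1) h
          exact ⟨j + 1, by push_cast; omega, by simpa using hj2⟩
      · obtain ⟨j, hj1, hj2⟩ := ih (s + 1) (by simpa [if_neg hy] using hx)
        exact ⟨j + 1, by push_cast; omega, by simpa using hj2⟩

theorem pvIdxs_idxOf (cols : List String) (c : String) (s : Int) (j : Nat)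
    (hc : cols[j]? = some c) :
    (pvIdxs c s cols).idxOf (s + (j : Int)) = (cols.take j).count c := by
  induction cols generalizing s j with
  | nil => simp at hc
  | cons x rest ih =>
      cases j with
      | zero =>
          simp only [List.getElem?_cons_zero, Option.some_inj] at hc
          subst hc
          simp [pvIdxs, List.idxOf_cons_self]
      | succ j =>
          simp only [List.getElem?_cons_succ] at hc
          have harith : s + ((j + 1 : Nat) : Int) = (s + 1) + (j : Int) := by push_cast; ring
          by_cases hx : x = c
          · subst hx
            have hcons : pvIdxs x s (x :: rest) = s :: pvIdxs x (s + 1) rest := by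
              simp [pvIdxs]
            rw [hcons, List.take_succ_cons, List.count_cons_self,
              List.idxOf_cons_ne _ (by push_cast; omega), harith, ih (s + 1) j hc]
          · have hcons : pvIdxs c s (x :: rest) = pvIdxs c (s + 1) rest := by
              simp [pvIdxs, hx]
            rw [hcons, List.take_succ_cons, harith, ih (s + 1) j hc,
              List.count_cons_of_ne (by simpa using hx)]

-- pyListSet basics
theorem pyListSet_length {α : Type} (xs : List α) (i : Int) (v : α) :
    (pyListSet xs i v).length = xs.length := by
  unfold pyListSet
  dsimp only
  split_ifs <;> simp

theorem pyListSet_getElem?_ne {α : Type} (xs : List α) (i : Int) (v : α) (j : Nat)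
    (hnn : 0 ≤ i) (hne : i ≠ (j : Int)) : (pyListSet xs i v)[j]? = xs[j]? := by
  unfold pyListSet
  have : ¬ i < 0 := by omega
  simp only [this, if_false]
  split_ifs with h
  · rw [List.getElem?_set_ne (by omega)]
  · rfl

theorem pyListSet_getElem?_self {α : Type} (xs : List α) (v : α) (j : Nat)
    (hj : j < xs.length) : (pyListSet xs (j : Int) v)[j]? = some v := by
  unfold pyListSet
  have h1 : ¬ (j : Int) < 0 := by omega
  simp only [h1, if_false]
  rw [if_pos (by constructor <;> omega)]
  simp [hj]

-- the inner fill over one group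
theorem pvFill_length (c : String) (l : List Int) (k0 : Int) (r : List String) :
    ((PySem.List.enumerate l k0).foldl
      (fun r p => pyListSet r p.2 (if p.1 = 0 then c else c ++ "_" ++ PySem.Int.toStr p.1))
      r).length = r.length := by
  induction l generalizing k0 r with
  | nil => simp [PySem.List.enumerate_nil]
  | cons i t ih =>
      rw [PySem.List.enumerate_cons, List.foldl_cons, ih, pyListSet_length]

theorem pvFill_getElem?_notMem (c : String) (l : List Int) (k0 : Int) (r : List String)
    (j : Nat) (hnn : ∀ i ∈ l, 0 ≤ i) (hnm : (j : Int) ∉ l) :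
    ((PySem.List.enumerate l k0).foldl
      (fun r p => pyListSet r p.2 (if p.1 = 0 then c else c ++ "_" ++ PySem.Int.toStr p.1))
      r)[j]? = r[j]? := by
  induction l generalizing k0 r with
  | nil => simp [PySem.List.enumerate_nil]
  | cons i t ih =>
      rw [PySem.List.enumerate_cons, List.foldl_cons]
      rw [ih (k0 + 1) _ (fun x hx => hnn x (List.mem_cons_of_mem _ hx))
          (fun h => hnm (List.mem_cons_of_mem _ h))]
      exact pyListSet_getElem?_ne _ _ _ _ (hnn i (List.mem_cons_self ..))
        (fun h => hnm (h ▸ List.mem_cons_self ..))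

theorem pvFill_getElem?_mem (c : String) (l : List Int) (k0 : Int) (r : List String)
    (j : Nat) (hnn : ∀ i ∈ l, 0 ≤ i) (hnd : l.Nodup) (hmem : (j : Int) ∈ l)
    (hj : j < r.length) :
    ((PySem.List.enumerate l k0).foldl
      (fun r p => pyListSet r p.2 (if p.1 = 0 then c else c ++ "_" ++ PySem.Int.toStr p.1))
      r)[j]? = some (pvRen c (k0 + (l.idxOf (j : Int) : Nat))) := by
  induction l generalizing k0 r with
  | nil => simp at hmem
  | cons i t ih =>
      rw [PySem.List.enumerate_cons, List.foldl_cons]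
      by_cases hij : i = (j : Int)
      · subst hij
        have hjt : (j : Int) ∉ t := (List.nodup_cons.mp hnd).1
        rw [pvFill_getElem?_notMem c t (k0 + 1) _ j
            (fun x hx => hnn x (List.mem_cons_of_mem _ hx)) hjt]
        rw [pyListSet_getElem?_self _ _ _ hj]
        rw [List.idxOf_cons_self]
        simp [pvRen]
      · have hmt : (j : Int) ∈ t := by
          rcases List.mem_cons.mp hmem with h | h
          · exact absurd h.symm hij
          · exact h
        rw [ih (k0 + 1) _ (fun x hx => hnn x (List.mem_cons_of_mem _ hx))
            (List.nodup_cons.mp hnd).2 hmt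
            (by rw [pyListSet_length]; exact hj)]
        rw [List.idxOf_cons_ne _ (by exact hij)]
        have harith : k0 + 1 + ((t.idxOf ((j : Int)) : Nat) : Int)
            = k0 + ((t.idxOf ((j : Int)) + 1 : Nat) : Int) := by push_cast; ring
        rw [harith]

-- the outer fold over the grouped items
theorem pvOuter_length (L : List (String × List Int))
    (r : List String) :
    (L.foldl
      (fun res q =>
        (PySem.List.enumerate q.2 0).foldl
          (fun r p => pyListSet r p.2 (if p.1 = 0 then q.1 else q.1 ++ "_" ++ PySem.Int.toStr p.1))
          res)
      r).length = r.length := by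
  induction L generalizing r with
  | nil => rfl
  | cons q t ih => rw [List.foldl_cons, ih, pvFill_length]

theorem pvOuter_getElem?_notMem (columns : List String) (L : List (String × List Int))
    (r : List String) (j : Nat) (cstar : String)
    (hL : ∀ q ∈ L, q.2 = pvIdxs q.1 0 columns)
    (hc : columns[j]? = some cstar)
    (hkeys : cstar ∉ L.map (·.1)) :
    (L.foldl
      (fun res q =>
        (PySem.List.enumerate q.2 0).foldl
          (fun r p => pyListSet r p.2 (if p.1 = 0 then q.1 else q.1 ++ "_" ++ PySem.Int.toStr p.1))
          res)
      r)[j]? = r[j]? := by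
  induction L generalizing r with
  | nil => rfl
  | cons q t ih =>
      rw [List.foldl_cons]
      have hq2 : q.2 = pvIdxs q.1 0 columns := hL q (List.mem_cons_self ..)
      have hkeys' : ¬ cstar = q.1 ∧ cstar ∉ t.map (·.1) := by
        simpa [List.map_cons] using hkeys
      have hnm : (j : Int) ∉ q.2 := by
        rw [hq2]
        intro h
        obtain ⟨j', hj1, hj2⟩ := pvIdxs_mem_elim columns q.1 0 _ h
        have : j = j' := by omega
        subst this
        rw [hc] at hj2
        exact hkeys'.1 (Option.some_inj.mp hj2)
      rw [ih _ (fun p hp => hL p (List.mem_cons_of_mem _ hp)) hkeys'.2]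
      exact pvFill_getElem?_notMem _ _ _ _ _
        (by rw [hq2]; exact pvIdxs_ge columns q.1 0) hnm

theorem pvOuter_getElem?_mem (columns : List String) (L : List (String × List Int))
    (r : List String) (j : Nat) (cstar : String)
    (hL : ∀ q ∈ L, q.2 = pvIdxs q.1 0 columns)
    (hnd : (L.map (·.1)).Nodup)
    (hc : columns[j]? = some cstar)
    (hmem : cstar ∈ L.map (·.1))
    (hj : j < r.length) :
    (L.foldl
      (fun res q =>
        (PySem.List.enumerate q.2 0).foldl
          (fun r p => pyListSet r p.2 (if p.1 = 0 then q.1 else q.1 ++ "_" ++ PySem.Int.toStr p.1))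
          res)
      r)[j]? = some (pvRen cstar (((columns.take j).count cstar : Nat) : Int)) := by
  induction L generalizing r with
  | nil => simp at hmem
  | cons q t ih =>
      rw [List.foldl_cons]
      have hq2 : q.2 = pvIdxs q.1 0 columns := hL q (List.mem_cons_self ..)
      by_cases hkey : q.1 = cstar
      · -- this group fills position j; later groups have different keys and leave it
        have hnotin : cstar ∉ t.map (·.1) := by
          rw [List.map_cons, List.nodup_cons] at hnd
          exact hkey ▸ hnd.1
        rw [pvOuter_getElem?_notMem columns t _ j cstar
            (fun p hp => hL p (List.mem_cons_of_mem _ hp)) hc hnotin]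
        have hmemj : (j : Int) ∈ q.2 := by
          rw [hq2, hkey]
          have := pvIdxs_mem_of columns cstar 0 j hc
          simpa using this
        rw [pvFill_getElem?_mem q.1 q.2 0 r j
            (by rw [hq2]; exact pvIdxs_ge columns q.1 0)
            (by rw [hq2]; exact pvIdxs_nodup columns q.1 0)
            hmemj hj]
        have hidx : q.2.idxOf ((j : Int)) = (columns.take j).count cstar := by
          rw [hq2, hkey]
          have := pvIdxs_idxOf columns cstar 0 j hc
          simpa using this
        rw [hkey, hidx]
        norm_num
      · have hnm : (j : Int) ∉ q.2 := by
          rw [hq2]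
          intro h
          obtain ⟨j', hj1, hj2⟩ := pvIdxs_mem_elim columns q.1 0 _ h
          have : j = j' := by omega
          subst this
          rw [hc] at hj2
          exact hkey (Option.some_inj.mp hj2.symm)
        have hmt : cstar ∈ t.map (·.1) := by
          rcases (by simpa [List.map_cons] using hmem : cstar = q.1 ∨ cstar ∈ t.map (·.1)) with h | h
          · exact absurd h.symm hkey
          · exact h
        rw [ih _ (fun p hp => hL p (List.mem_cons_of_mem _ hp))
            (by rw [List.map_cons, List.nodup_cons] at hnd; exact hnd.2) hmt
            (by rw [pvFill_length]; exact hj)]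

-- ===== VERDICT (by name: the statement is the Claim_ definition above) =====
-- the positions dict lookups are exactly pvIdxs
theorem pvPositions_getD (columns : List String) (c : String) :
    (((PySem.List.enumerate columns 0).foldl
        (fun d p => d.modify p.2 [] (· ++ [p.1]))
        (PySem.Dict.empty : PySem.Dict String (List Int)))).getD c []
      = pvIdxs c 0 columns := by
  rw [show ((PySem.List.enumerate columns 0).foldl
        (fun d p => d.modify p.2 [] (· ++ [p.1]))
        (PySem.Dict.empty : PySem.Dict String (List Int)))
      = (((PySem.List.enumerate columns 0).map Prod.swap).foldl
        (fun d p => d.modify p.1 [] (· ++ [p.2]))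
        (PySem.Dict.empty : PySem.Dict String (List Int))) from by rw [List.foldl_map]; rfl]
  rw [PySem.Dict.getD_foldl_modify_append]
  rw [PySem.Dict.getD_empty, List.nil_append]
  rw [List.filter_map, List.map_map]
  rw [← pvIdxs_eq_enumFilter columns 0 c]
  rfl

theorem pvPositions_nodup_keys (columns : List String) :
    (((PySem.List.enumerate columns 0).foldl
        (fun d p => d.modify p.2 [] (· ++ [p.1]))
        (PySem.Dict.empty : PySem.Dict String (List Int)))).keys.Nodup := by
  exact PySem.Dict.nodup_keys_foldl_modify_key (PySem.List.enumerate columns 0)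
    (fun p => p.2) [] (fun _ p l => l ++ [p.1]) PySem.Dict.empty PySem.Dict.nodup_keys_empty

-- ===== VERDICT (by name: the statement is the Claim_ definition above) =====
theorem unique_feature_names_py_spec : Claim_equal_unique_feature_names_py := by
  intro columns _
  unfold Spec_unique_feature_names_py
  have hA : unique_feature_names_py columns = pvGold [] columns := by
    unfold unique_feature_names_py
    rw [pvFoldA, List.nil_append, pvGold_eq_specFun]
    exact pvSpecFun_congr _ _ _ (fun x => by simp [PySem.Dict.getD_empty])
  rw [hA]
  unfold unique_feature_names_py_alt
  set P := ((PySem.List.enumerate columns 0).foldl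
      (fun d p => d.modify p.2 [] (· ++ [p.1]))
      (PySem.Dict.empty : PySem.Dict String (List Int))) with hPdef
  have hitems : ∀ q ∈ P.items, q.2 = pvIdxs q.1 0 columns := by
    rintro ⟨k, v⟩ hq
    have h := PySem.Dict.getD_of_mem_items P hq (pvPositions_nodup_keys columns) []
    rw [← h, hPdef, pvPositions_getD]
  have hknodup : (P.items.map (·.1)).Nodup := by
    have := pvPositions_nodup_keys columns
    simpa [PySem.Dict.keys] using this
  refine (List.ext_getElem? (fun j => ?_)).symm
  by_cases hj : j < columns.length
  · have hc : columns[j]? = some columns[j] := List.getElem?_eq_getElem hj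
    rw [pvOuter_getElem?_mem columns P.items _ j columns[j] hitems hknodup hc ?_ ?_]
    · rw [pvGold_getElem? columns [] j columns[j] hc]
      simp
    · -- columns[j] is a key of the positions dict
      by_contra hnk
      have hnkeys : columns[j] ∉ P.keys := by
        simpa [PySem.Dict.keys] using hnk
      have hcontain : P.contains columns[j] = false := by
        by_cases h : P.contains columns[j] = true
        · exact absurd ((PySem.Dict.contains_iff_mem_keys P _).mp h) hnkeys
        · simpa using h
      have hempty : P.getD columns[j] [] = [] :=
        PySem.Dict.getD_of_not_contains P [] hcontain
      rw [hPdef, pvPositions_getD] at hempty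
      have hmem := pvIdxs_mem_of columns columns[j] 0 j hc
      rw [hempty] at hmem
      simp at hmem
    · simpa using hj
  · have h1 : ((List.replicate columns.length "").length ≤ j) := by simpa using Nat.le_of_not_lt hj
    rw [List.getElem?_eq_none (by rw [pvOuter_length]; simpa using Nat.le_of_not_lt hj)]
    rw [List.getElem?_eq_none (by rw [pvGold_length]; exact Nat.le_of_not_lt hj)]
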